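-- pv_equiv track=rewrite | github.com/kawright/robco_screensaver | main.py | get_left_bound
-- ===== SOURCE A (Python) =====
-- import string
--
-- def get_left_bound(index: int, chars: str) -> int:
--     """
--     Get the leftmost letter of the word in which the current index belongs. If
--     the current index points to a garbage character, return None.
--     """
--
--     ret: int                # Return data
--
--     if chars[index] not in string.ascii_uppercase:
--         return None
--     ret = index
--     while True:
--         if ret-1 < 0:
--             break
--         if chars[ret-1] not in string.ascii_uppercase:
--             break
--         ret -= 1
--     return ret
-- ===== SOURCE B (Python) =====
-- import string
--
-- def get_left_bound(index: int, chars: str) -> int: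
--     """Forward single pass: remember the start of the current uppercase run."""
--     if chars[index] not in string.ascii_uppercase:
--         return None
--     i = index if index >= 0 else index + len(chars)
--     start = 0
--     for j in range(i):
--         if chars[j] not in string.ascii_uppercase:
--             start = j + 1
--     return start
-- ===== Notes on version B (the rewrite author's own statement) =====
-- stated objective: alternative
-- what changed: B replaces A's backward while-loop scan from the index with a single forward pass that tracks the start of the current uppercase run, after normalizing a negative index.
-- intended difference: For in-range negative indices pointing at an uppercase letter, A returns the negative index itself without scanning (Python wrap-around quirk), while B returns the actual non-negative left boundary of the word, which is the intended value. — e.g. on get_left_bound(-1, "AB"): A returns some (-1), B returns some 0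
import Mathlib
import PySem

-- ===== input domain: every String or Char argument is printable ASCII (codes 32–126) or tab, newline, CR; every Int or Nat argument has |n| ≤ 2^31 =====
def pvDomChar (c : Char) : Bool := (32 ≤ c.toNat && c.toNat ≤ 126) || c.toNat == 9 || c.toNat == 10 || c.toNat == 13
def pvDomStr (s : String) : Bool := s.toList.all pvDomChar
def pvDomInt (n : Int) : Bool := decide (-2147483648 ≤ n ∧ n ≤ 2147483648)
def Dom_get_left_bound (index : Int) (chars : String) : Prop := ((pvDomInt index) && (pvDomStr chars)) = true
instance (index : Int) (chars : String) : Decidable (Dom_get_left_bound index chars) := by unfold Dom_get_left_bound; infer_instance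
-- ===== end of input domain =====

-- B replaces A's backward while-loop scan with a forward pass tracking the start of the
-- current uppercase run (alternative decomposition; on in-range negative indices B returns the
-- intended non-negative boundary, see D_).


-- ===== PORT A =====
-- Python "c in string.ascii_uppercase" on the one-character string c = membership of the char
def pyUpper (c : Char) : Bool := "ABCDEFGHIJKLMNOPQRSTUVWXYZ".toList.contains c

-- the 'while True' loop of A; terminates because ret strictly decreases while ret - 1 ≥ 0
def leftLoop (chars : String) (ret : Int) : Int :=
  if ret - 1 < 0 then ret
  else
    match PySem.Str.pyGet? chars (ret - 1) with
    | none => ret            -- unreachable under Pre_ (0 ≤ ret - 1 < len chars there)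
    | some c => if pyUpper c then leftLoop chars (ret - 1) else ret
termination_by ret.toNat
decreasing_by omega

def get_left_bound (index : Int) (chars : String) : Option Int :=
  match PySem.Str.pyGet? chars index with
  | none => none             -- IndexError in Python; excluded by Pre_
  | some c => if pyUpper c then some (leftLoop chars index) else none

-- ===== PORT B =====
def get_left_bound_alt (index : Int) (chars : String) : Option Int :=
  match PySem.Str.pyGet? chars index with
  | none => none             -- IndexError in Python; excluded by Pre_
  | some c =>
    if pyUpper c then
      let i : Int := if index ≥ 0 then index else index + PySem.Str.len chars
      some ((PySem.List.pyRange 0 i 1).foldl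
        (fun start j =>
          -- chars[j]: j is always in range here, so the default is never used
          if !pyUpper (PySem.List.pyGetD chars.toList j 'A') then j + 1 else start) 0)
    else none

-- ===== PRECONDITION & SPEC =====
-- Pre_ excludes exactly the out-of-range indices, on which Python A raises IndexError.
def Pre_get_left_bound (index : Int) (chars : String) : Prop :=
  PySem.Raise.InRange chars.toList.length index
instance (index : Int) (chars : String) : Decidable (Pre_get_left_bound index chars) := by
  unfold Pre_get_left_bound; infer_instance
def pvWitness_get_left_bound : Int × String := (0, "A")

-- For in-range negative indices pointing at an uppercase letter, A returns the negative index
-- itself without scanning (Python wrap-around quirk), while B returns the actual non-negative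
-- left boundary of the word, which is the intended value.
def D_get_left_bound (index : Int) (chars : String) : Prop :=
  index < 0 ∧
    (match PySem.Str.pyGet? chars index with
     | some c => ("ABCDEFGHIJKLMNOPQRSTUVWXYZ".toList.contains c) = true
     | none => False)
instance (index : Int) (chars : String) : Decidable (D_get_left_bound index chars) := by
  unfold D_get_left_bound
  exact instDecidableAnd (dq := by cases PySem.Str.pyGet? chars index <;> infer_instance)

def Spec_get_left_bound (index : Int) (chars : String) (out : Option Int) : Prop :=
  ¬ D_get_left_bound index chars → out = get_left_bound_alt index chars
instance (index : Int) (chars : String) (out : Option Int) : Decidable (Spec_get_left_bound index chars out) := by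
  unfold Spec_get_left_bound; infer_instance

def pvDiffWitness_get_left_bound : Int × String := (-1, "AB")
def pvDiffWitnessOut_get_left_bound : (Option Int) × (Option Int) := (some (-1), some 0)

-- ===== CLAIM (what is proved, stated in full; the proofs are below) =====
def Claim_unchanged_get_left_bound : Prop := ∀ (index : Int) (chars : String), Dom_get_left_bound index chars → Pre_get_left_bound index chars → Spec_get_left_bound index chars (get_left_bound index chars)
def Claim_changed_get_left_bound : Prop := Dom_get_left_bound (pvDiffWitness_get_left_bound.1) (pvDiffWitness_get_left_bound.2) ∧ Pre_get_left_bound (pvDiffWitness_get_left_bound.1) (pvDiffWitness_get_left_bound.2) ∧ D_get_left_bound (pvDiffWitness_get_left_bound.1) (pvDiffWitness_get_left_bound.2) ∧ get_left_bound (pvDiffWitness_get_left_bound.1) (pvDiffWitness_get_left_bound.2) = pvDiffWitnessOut_get_left_bound.1 ∧ get_left_bound_alt (pvDiffWitness_get_left_bound.1) (pvDiffWitness_get_left_bound.2) = pvDiffWitnessOut_get_left_bound.2 ∧ pvDiffWitnessOut_get_left_bound.1 ≠ pvDiffWitnessOut_get_left_bound.2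
def Claim_exact_get_left_bound : Prop := ∀ (index : Int) (chars : String), Dom_get_left_bound index chars → Pre_get_left_bound index chars → D_get_left_bound index chars → get_left_bound index chars ≠ get_left_bound_alt index chars

-- ===== LEMMAS AND PROOFS =====

-- B's fold over range(i), written exactly as in the port
def runFold (chars : String) (i : Int) : Int :=
  (PySem.List.pyRange 0 i 1).foldl
    (fun start j =>
      if !pyUpper (PySem.List.pyGetD chars.toList j 'A') then j + 1 else start) 0

lemma loop_eq_fold (chars : String) :
    ∀ i : Nat, i < chars.toList.length → leftLoop chars (i : Int) = runFold chars (i : Int) := by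
  intro i
  induction i with
  | zero =>
    intro _
    rw [leftLoop.eq_def, runFold]
    norm_num [PySem.List.pyRange_one_eq_nil]
  | succ k ih =>
    intro hlt
    have hk : k < chars.toList.length := Nat.lt_of_succ_lt hlt
    have hcast : ((k + 1 : Nat) : Int) - 1 = (k : Int) := by push_cast; ring
    rw [leftLoop.eq_def]
    have hnotneg : ¬ (((k + 1 : Nat) : Int) - 1 < 0) := by push_cast; omega
    rw [if_neg hnotneg, hcast]
    have hsome : PySem.Str.pyGet? chars (k : Int) = some (chars.toList[k]'hk) := by
      simp [PySem.List.pyGet?_natCast, List.getElem?_eq_getElem hk]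
    rw [runFold]
    have hsplit : PySem.List.pyRange 0 ((k + 1 : Nat) : Int) 1
        = PySem.List.pyRange 0 (k : Int) 1 ++ [(k : Int)] := by
      have h1 : ((k + 1 : Nat) : Int) = (k : Int) + 1 := by push_cast; ring
      rw [h1, PySem.List.pyRange_one_succ_right (by positivity)]
    rw [hsplit, List.foldl_append]
    have hgd : PySem.List.pyGetD chars.toList (k : Int) 'A' = chars.toList[k]'hk := by
      simp [PySem.List.pyGetD_natCast, List.getD_eq_getElem?_getD, List.getElem?_eq_getElem hk]
    rw [hsome]
    simp only [List.foldl_cons, List.foldl_nil, hgd]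
    by_cases hu : pyUpper (chars.toList[k]'hk)
    · rw [if_pos hu, ih hk, runFold]
      simp [hu]
    · simp only [hu, Bool.not_false, if_pos]
      push_cast; ring

lemma runFold_nonneg (chars : String) (i : Int) : 0 ≤ runFold chars i := by
  rw [runFold]
  have key : ∀ (l : List Int) (acc : Int), 0 ≤ acc → (∀ j ∈ l, 0 ≤ j) →
      0 ≤ l.foldl (fun start j =>
        if !pyUpper (PySem.List.pyGetD chars.toList j 'A') then j + 1 else start) acc := by
    intro l
    induction l with
    | nil => intro acc h _; simpa using h
    | cons x t iht =>
      intro acc hacc hmem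
      simp only [List.foldl_cons]
      apply iht
      · split
        · have := hmem x (by simp); omega
        · exact hacc
      · intro j hj; exact hmem j (by simp [hj])
  apply key
  · norm_num
  · intro j hj
    have := (PySem.List.mem_pyRange_one).1 hj
    omega

-- ===== VERDICT (by name: the statement is the Claim_ definition above) =====
theorem get_left_bound_spec : Claim_unchanged_get_left_bound := by
  intro index chars _ hpre hnd
  unfold Pre_get_left_bound PySem.Raise.InRange at hpre
  unfold get_left_bound get_left_bound_alt
  cases h : PySem.Str.pyGet? chars index with
  | none =>
    exfalso
    rw [show PySem.Str.pyGet? chars index = PySem.List.pyGet? chars.toList index by simp [pysem]] at h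
    rw [PySem.List.pyGet?_eq_none_iff] at h
    exact h (by unfold PySem.Raise.InRange; omega)
  | some c =>
    by_cases hu : pyUpper c
    · simp only [hu, if_pos]
      have hidx : 0 ≤ index := by
        by_contra hneg
        apply hnd
        refine ⟨by omega, ?_⟩
        rw [h]
        exact hu
      obtain ⟨n, rfl⟩ : ∃ n : Nat, index = (n : Int) :=
        ⟨index.toNat, (Int.toNat_of_nonneg hidx).symm⟩
      have hlen : n < chars.toList.length := by omega
      have hif : (if (n : Int) ≥ 0 then (n : Int) else (n : Int) + PySem.Str.len chars) = (n : Int) := by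
        rw [if_pos (by positivity)]
      simp only [hif]
      exact congrArg some (loop_eq_fold chars n hlen)
    · simp [hu]

theorem get_left_bound_changed : Claim_changed_get_left_bound := by
  unfold Claim_changed_get_left_bound
  refine ⟨by decide, by decide, by decide, ?_, by decide, by decide⟩
  show get_left_bound (-1) "AB" = some (-1)
  have hloop : leftLoop "AB" (-1) = -1 := by
    rw [leftLoop.eq_def]
    norm_num
  unfold get_left_bound
  rw [hloop]
  decide

theorem get_left_bound_tight : Claim_exact_get_left_bound := by
  intro index chars _ hpre hd
  obtain ⟨hneg, hmatch⟩ := hd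
  unfold Pre_get_left_bound PySem.Raise.InRange at hpre
  cases h : PySem.Str.pyGet? chars index with
  | none => rw [h] at hmatch; exact absurd hmatch (by simp)
  | some c =>
    rw [h] at hmatch
    have hu : pyUpper c = true := hmatch
    have hloop : leftLoop chars index = index := by
      rw [leftLoop.eq_def]
      rw [if_pos (by omega)]
    unfold get_left_bound get_left_bound_alt
    rw [h]
    simp only [hu, if_pos, hloop]
    have hif : (if index ≥ 0 then index else index + PySem.Str.len chars)
        = index + PySem.Str.len chars := by
      rw [if_neg (by omega)]
    rw [hif]
    intro heq
    have := Option.some.inj heq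
    have hnn := runFold_nonneg chars (index + PySem.Str.len chars)
    rw [runFold] at hnn
    omega
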